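-- pv_equiv track=rewrite | github.com/pypi-data/pypi-mirror-275 | packages/mutt-html-reply/mutt_html_reply-0.1.0.tar.gz/mutt_html_reply-0.1.0/src/mutt_html_reply/mutt_html_reply.py | _get_header_html
-- ===== SOURCE A (Python) =====
-- HEADER_FIRST_SORT_LIST_COMPARISON = ['F','D','T','C']
--
-- def _get_header_html(text):
--     resorted_text = []
--     for first in HEADER_FIRST_SORT_LIST_COMPARISON:
--         for header in text:
--             if header[0] == first:
--                 resorted_text.append(header)
--     html_headers = "<p>\n"
--     for header in resorted_text:
--         html_headers = html_headers + '<br>' + header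
--     html_headers = html_headers + "\n</p>\n"
--     return html_headers
-- ===== SOURCE B (Python) =====
-- def _get_header_html(text):
--     buckets = {'F': [], 'D': [], 'T': [], 'C': []}
--     for header in text:
--         bucket = buckets.get(header[0])
--         if bucket is not None:
--             bucket.append(header)
--     ordered = buckets['F'] + buckets['D'] + buckets['T'] + buckets['C']
--     return "<p>\n" + "".join('<br>' + h for h in ordered) + "\n</p>\n"
-- ===== Notes on version B (the rewrite author's own statement) =====
-- stated objective: faster
-- what changed: A scans the whole list four times, once per leading character; B makes a single partitioning pass into four buckets keyed by the first character and concatenates them in the fixed order F,D,T,C, joining the HTML pieces at the end.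
import Mathlib
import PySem

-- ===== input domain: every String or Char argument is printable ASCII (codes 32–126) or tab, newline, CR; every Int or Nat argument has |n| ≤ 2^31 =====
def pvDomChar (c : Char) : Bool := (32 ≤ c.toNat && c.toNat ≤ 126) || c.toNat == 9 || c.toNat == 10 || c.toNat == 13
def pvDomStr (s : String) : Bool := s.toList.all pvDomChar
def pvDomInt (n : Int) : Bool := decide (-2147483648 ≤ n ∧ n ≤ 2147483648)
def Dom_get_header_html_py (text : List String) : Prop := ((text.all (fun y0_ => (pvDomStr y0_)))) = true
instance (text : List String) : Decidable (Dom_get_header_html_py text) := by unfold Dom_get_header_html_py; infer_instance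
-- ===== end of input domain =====

-- B replaces A's four scans of text (one per leading character) by a single
-- partitioning pass into four buckets, concatenated in the fixed order F,D,T,C.

-- ===== PORT A =====
def get_header_html_py (text : List String) : String :=
  let resorted_text : List String :=
    (['F', 'D', 'T', 'C'] : List Char).foldl
      (fun acc first =>
        text.foldl
          (fun acc2 header =>
            if PySem.Str.pyGet? header 0 = some first then acc2 ++ [header] else acc2)
          acc)
      []
  let html_headers := "<p>\n"
  let html_headers := resorted_text.foldl (fun s header => s ++ "<br>" ++ header) html_headers
  let html_headers := html_headers ++ "\n</p>\n"
  html_headers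

-- ===== PORT B =====
-- buckets is the fixed-key dict {'F':…,'D':…,'T':…,'C':…} as a 4-tuple of lists
def get_header_html_py_alt (text : List String) : String :=
  let buckets : List String × List String × List String × List String :=
    text.foldl
      (fun b header =>
        let c := PySem.Str.pyGet? header 0
        if c = some 'F' then (b.1 ++ [header], b.2.1, b.2.2.1, b.2.2.2)
        else if c = some 'D' then (b.1, b.2.1 ++ [header], b.2.2.1, b.2.2.2)
        else if c = some 'T' then (b.1, b.2.1, b.2.2.1 ++ [header], b.2.2.2)
        else if c = some 'C' then (b.1, b.2.1, b.2.2.1, b.2.2.2 ++ [header])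
        else b)
      ([], [], [], [])
  let ordered := buckets.1 ++ buckets.2.1 ++ buckets.2.2.1 ++ buckets.2.2.2
  "<p>\n" ++ String.join (ordered.map (fun h => "<br>" ++ h)) ++ "\n</p>\n"

-- ===== PRECONDITION & SPEC =====
-- Pre_ excludes lists containing an empty header, on which A (header[0]) raises IndexError.
def Pre_get_header_html_py (text : List String) : Prop :=
  (text.all (fun s => s ≠ "")) = true
instance (text : List String) : Decidable (Pre_get_header_html_py text) := by
  unfold Pre_get_header_html_py; infer_instance
def pvWitness_get_header_html_py : List String := ["From: a", "Date: b", "To: c", "Cc: d", "x"]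

def Spec_get_header_html_py (text : List String) (out : String) : Prop := out = get_header_html_py_alt text
instance (text : List String) (out : String) : Decidable (Spec_get_header_html_py text out) := by unfold Spec_get_header_html_py; infer_instance

-- ===== CLAIM (what is proved, stated in full; the proofs are below) =====
def Claim_equal_get_header_html_py : Prop := ∀ (text : List String), Dom_get_header_html_py text → Pre_get_header_html_py text → Spec_get_header_html_py text (get_header_html_py text)

-- ===== LEMMAS AND PROOFS =====

theorem pv_foldl_filter (f : String → Option Char) (first : Char) (text acc : List String) :
    text.foldl (fun acc2 h => if f h = some first then acc2 ++ [h] else acc2) acc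
      = acc ++ text.filter (fun h => decide (f h = some first)) := by
  induction text generalizing acc with
  | nil => simp
  | cons x xs ih =>
      simp only [List.foldl_cons, List.filter_cons]
      by_cases hx : f x = some first
      · simp only [hx]; simp [ih]
      · simp [hx, ih]

theorem pv_buckets_eq (f : String → Option Char) (text : List String)
    (a b c d : List String) :
    text.foldl
      (fun b header =>
        let ch := f header
        if ch = some 'F' then (b.1 ++ [header], b.2.1, b.2.2.1, b.2.2.2)
        else if ch = some 'D' then (b.1, b.2.1 ++ [header], b.2.2.1, b.2.2.2)
        else if ch = some 'T' then (b.1, b.2.1, b.2.2.1 ++ [header], b.2.2.2)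
        else if ch = some 'C' then (b.1, b.2.1, b.2.2.1, b.2.2.2 ++ [header])
        else b)
      (a, b, c, d)
      = (a ++ text.filter (fun h => decide (f h = some 'F')),
         b ++ text.filter (fun h => decide (f h = some 'D')),
         c ++ text.filter (fun h => decide (f h = some 'T')),
         d ++ text.filter (fun h => decide (f h = some 'C'))) := by
  induction text generalizing a b c d with
  | nil => simp
  | cons x xs ih =>
      simp only [List.foldl_cons, List.filter_cons]
      by_cases h1 : f x = some 'F'
      · simp only [h1]; simp [ih]
      · by_cases h2 : f x = some 'D'
        · simp only [h2]; simp [ih]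
        · by_cases h3 : f x = some 'T'
          · simp only [h3]; simp [ih]
          · by_cases h4 : f x = some 'C'
            · simp only [h4]; simp [ih]
            · simp [h1, h2, h3, h4, ih]

theorem pv_str_foldl_shift (l : List String) : ∀ (a b : String),
    l.foldl (fun r s => r ++ s) (a ++ b) = a ++ l.foldl (fun r s => r ++ s) b := by
  induction l with
  | nil => simp
  | cons x xs ih => intro a b; simp only [List.foldl_cons, String.append_assoc, ih]

theorem pv_join_cons (y : String) (l : List String) :
    String.join (y :: l) = y ++ String.join l := by
  simp only [String.join, List.foldl_cons]
  simpa using pv_str_foldl_shift l y ""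

theorem pv_foldl_join (l : List String) (init : String) :
    l.foldl (fun s h => s ++ "<br>" ++ h) init
      = init ++ String.join (l.map (fun h => "<br>" ++ h)) := by
  induction l generalizing init with
  | nil => simp [String.join]
  | cons x xs ih =>
      simp only [List.foldl_cons, List.map_cons, pv_join_cons, ih]
      simp [String.append_assoc]

-- ===== VERDICT (by name: the statement is the Claim_ definition above) =====
theorem get_header_html_py_spec : Claim_equal_get_header_html_py := by
  intro text _ _
  unfold Spec_get_header_html_py get_header_html_py get_header_html_py_alt
  simp only [pv_buckets_eq (fun h => PySem.Str.pyGet? h 0),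
    pv_foldl_filter (fun h => PySem.Str.pyGet? h 0), pv_foldl_join,
    List.foldl_cons, List.foldl_nil, List.nil_append, List.append_assoc]
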